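-- pv_equiv track=rewrite | github.com/YitingTsaii/Python-Based-Projects | 1-binary tree.py | num_bigger
-- ===== SOURCE A (Python) =====
-- def num_bigger(compare, num):
--     count = 0
--     for j in range(len(compare)-1, -1, -1):
--         if compare[j] > num:
--             break
--         else:
--             count = count + 1
--     return count
-- ===== SOURCE B (Python) =====
-- def num_bigger(compare, num):
--     last_big = -1
--     for j, x in enumerate(compare):
--         if x > num:
--             last_big = j
--     return len(compare) - 1 - last_big
-- ===== Notes on version B (the rewrite author's own statement) =====
-- stated objective: alternative
-- what changed: Replaces A's backward scan with an early break by a single forward full pass that tracks the index of the last element strictly greater than num and returns len(compare)-1-last_big.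
import Mathlib
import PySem

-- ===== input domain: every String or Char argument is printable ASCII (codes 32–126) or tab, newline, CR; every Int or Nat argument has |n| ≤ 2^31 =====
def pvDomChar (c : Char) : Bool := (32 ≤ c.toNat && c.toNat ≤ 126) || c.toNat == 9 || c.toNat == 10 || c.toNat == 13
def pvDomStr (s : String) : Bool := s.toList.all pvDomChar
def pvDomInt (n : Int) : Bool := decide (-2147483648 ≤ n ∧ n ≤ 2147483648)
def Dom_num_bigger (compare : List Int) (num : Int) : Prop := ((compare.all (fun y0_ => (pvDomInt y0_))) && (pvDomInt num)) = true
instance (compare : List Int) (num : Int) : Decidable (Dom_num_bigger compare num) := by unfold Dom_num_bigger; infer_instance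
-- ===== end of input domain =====

-- B: one forward pass tracking the index of the last element > num instead of A's
-- backward count with an early break; same O(n) cost, different decomposition.

-- ===== PORT A =====
-- A's backward index loop with break: recursion over the countdown range, carrying `count`.
def numBiggerGo (compare : List Int) (num : Int) : List Int → Int → Int
  | [], count => count
  | j :: js, count =>
    if PySem.List.pyGetD compare j 0 > num then count   -- break (index always in range)
    else numBiggerGo compare num js (count + 1)

def num_bigger (compare : List Int) (num : Int) : Int :=
  numBiggerGo compare num (PySem.List.pyRange ((compare.length : Int) - 1) (-1) (-1)) 0

-- ===== PORT B =====
def num_bigger_alt (compare : List Int) (num : Int) : Int :=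
  let last_big : Int :=
    (PySem.List.enumerate compare 0).foldl (fun lb p => if p.2 > num then p.1 else lb) (-1)
  (compare.length : Int) - 1 - last_big

-- ===== PRECONDITION & SPEC =====
def Spec_num_bigger (compare : List Int) (num : Int) (out : Int) : Prop := out = num_bigger_alt compare num
instance (compare : List Int) (num : Int) (out : Int) : Decidable (Spec_num_bigger compare num out) := by unfold Spec_num_bigger; infer_instance

-- ===== CLAIM (what is proved, stated in full; the proofs are below) =====
def Claim_equal_num_bigger : Prop := ∀ (compare : List Int) (num : Int), Dom_num_bigger compare num → Spec_num_bigger compare num (num_bigger compare num)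

-- ===== LEMMAS AND PROOFS =====

-- the loop body only looks at indices in the list; equal reads give equal runs
theorem numBiggerGo_congr (c1 c2 : List Int) (num : Int) (l : List Int) (count : Int)
    (h : ∀ j ∈ l, PySem.List.pyGetD c1 j 0 = PySem.List.pyGetD c2 j 0) :
    numBiggerGo c1 num l count = numBiggerGo c2 num l count := by
  induction l generalizing count with
  | nil => rfl
  | cons j js ih =>
    simp only [numBiggerGo, h j (List.mem_cons_self ..)]
    split
    · rfl
    · exact ih _ fun k hk => h k (List.mem_cons_of_mem _ hk)

theorem numBiggerGo_shift (xs : List Int) (num : Int) (l : List Int) (c : Int) :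
    numBiggerGo xs num l c = c + numBiggerGo xs num l 0 := by
  induction l generalizing c with
  | nil => simp [numBiggerGo]
  | cons j js ih =>
    simp only [numBiggerGo]
    split
    · simp
    · rw [ih (c + 1), ih (0 + 1)]; ring

theorem num_bigger_append (xs : List Int) (x num : Int) :
    num_bigger (xs ++ [x]) num =
      if x > num then 0 else num_bigger xs num + 1 := by
  unfold num_bigger
  have hlen : ((xs ++ [x]).length : Int) - 1 = (xs.length : Int) := by
    push_cast [List.length_append]; simp
  rw [hlen, PySem.List.pyRange_neg_one_cons (by omega)]
  have hx : PySem.List.pyGetD (xs ++ [x]) (xs.length : Int) 0 = x := by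
    rw [PySem.List.pyGetD_natCast]
    simp [List.getD]
  simp only [numBiggerGo, hx]
  split
  · rfl
  · rw [numBiggerGo_congr (xs ++ [x]) xs num _ (0 + 1) ?_]
    · rw [numBiggerGo_shift]; ring
    · intro j hj
      rw [PySem.List.mem_pyRange_neg_one] at hj
      have h0 : 0 ≤ j := by omega
      have hjlt : j < (xs.length : Int) := by omega
      obtain ⟨k, rfl⟩ := Int.eq_ofNat_of_zero_le h0
      have hk : k < xs.length := by exact_mod_cast hjlt
      rw [PySem.List.pyGetD_natCast, PySem.List.pyGetD_natCast]
      simp [List.getD, List.getElem?_append_left hk]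

theorem alt_append (xs : List Int) (x num : Int) :
    num_bigger_alt (xs ++ [x]) num =
      if x > num then 0 else num_bigger_alt xs num + 1 := by
  unfold num_bigger_alt
  rw [PySem.List.enumerate_append]
  simp only [List.foldl_append, List.length_append, List.length_cons, List.length_nil]
  simp only [PySem.List.enumerate, List.foldl_cons, List.foldl_nil]
  split
  · push_cast; ring
  · push_cast; ring

theorem num_bigger_eq_alt (compare : List Int) (num : Int) :
    num_bigger compare num = num_bigger_alt compare num := by
  induction compare using List.reverseRecOn with
  | nil =>
    simp [num_bigger, num_bigger_alt, PySem.List.pyRange_neg_one_eq_nil, numBiggerGo,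
      PySem.List.enumerate]
  | append_singleton xs x ih =>
    rw [num_bigger_append, alt_append, ih]

-- ===== VERDICT (by name: the statement is the Claim_ definition above) =====
theorem num_bigger_spec : Claim_equal_num_bigger := by
  intro compare num _
  exact num_bigger_eq_alt compare num
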